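-- pv_equiv track=rewrite | github.com/Durendal/RC6-Block-Cipher | rc6/helpers.py | blockConverter
-- ===== SOURCE A (Python) =====
-- def blockConverter(sentence):
--     encoded = []
--     res = ""
--     for i in range(0,len(sentence)):
--         if (i % 4 == 0) and (i != 0):
--             encoded.append(res)
--             res = ""
--
--         temp = bin(ord(sentence[i]))[2:]
--
--         if len(temp) < 8:
--             temp = "0" * (8 - len(temp)) + temp
--         res += temp
--     encoded.append(res)
--
--     return encoded
-- ===== SOURCE B (Python) =====
-- def blockConverter(sentence):
--     blocks = [sentence[i:i + 4] for i in range(0, len(sentence), 4)]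
--     return ["".join(format(ord(c), '08b') for c in block) for block in blocks] or [""]
-- ===== Notes on version B (the rewrite author's own statement) =====
-- stated objective: idiomatic
-- what changed: Replaces the flat index loop with its modulo-4 boundary test and mutable accumulator by an outer pass over 4-character slices, joining a fixed-width 8-bit encoding of each character inside each slice, with the empty input handled by a single explicit fallback.
import Mathlib
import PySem

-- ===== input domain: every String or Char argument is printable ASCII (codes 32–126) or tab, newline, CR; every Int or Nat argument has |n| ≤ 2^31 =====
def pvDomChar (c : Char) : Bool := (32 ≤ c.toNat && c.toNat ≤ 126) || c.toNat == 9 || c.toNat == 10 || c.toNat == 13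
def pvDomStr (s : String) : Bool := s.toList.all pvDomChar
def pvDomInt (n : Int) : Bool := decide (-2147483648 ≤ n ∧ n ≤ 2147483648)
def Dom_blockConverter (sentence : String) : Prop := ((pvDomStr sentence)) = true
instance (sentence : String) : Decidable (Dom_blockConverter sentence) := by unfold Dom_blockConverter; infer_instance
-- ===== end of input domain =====

-- B replaces A's flat index loop (modulo-4 boundary test, mutable accumulator) by an
-- outer pass over 4-char slices with a per-char 8-bit encode joined inside each slice;
-- same O(n) cost, a plainer decomposition.  Strings are carried as List Char (PySem convention).

-- ===== PORT A =====
-- loop body of A: boundary push at i % 4 == 0 and i != 0, then append the padded bin(ord(sentence[i]))[2:]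
def pvStepA (cs : List Char) (st : List String × List Char) (i : Int) : List String × List Char :=
  let st1 := if PySem.Int.mod i 4 = 0 ∧ i ≠ 0 then (st.1 ++ [String.ofList st.2], ([] : List Char)) else st
  let temp := PySem.Int.toBinChars (((PySem.List.pyGetD cs i ' ').toNat : Int))  -- bin(ord(sentence[i]))[2:]
  let temp := if temp.length < 8 then List.replicate (8 - temp.length) '0' ++ temp else temp
  (st1.1, st1.2 ++ temp)

def blockConverter (sentence : String) : List String :=
  let cs := sentence.toList
  let st := (PySem.List.pyRange 0 (cs.length : Int)).foldl (pvStepA cs) ([], [])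
  st.1 ++ [String.ofList st.2]

-- ===== PORT B =====
-- format(ord(c), '08b'): binary digits of the code point, zero-padded on the left to width 8
def pvEnc8 (c : Char) : List Char :=
  let t := PySem.Int.toBinChars ((c.toNat : Int))
  if t.length < 8 then List.replicate (8 - t.length) '0' ++ t else t

-- the slices sentence[i:i+4] for i in range(0, len, 4)
def pvChunk4 : List Char → List (List Char)
  | [] => []
  | c :: rest => (c :: rest.take 3) :: pvChunk4 (rest.drop 3)
termination_by l => l.length
decreasing_by simp

def blockConverter_alt (sentence : String) : List String :=
  let out := (pvChunk4 sentence.toList).map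
    (fun b => String.ofList (PySem.Chars.join [] (b.map pvEnc8)))  -- "".join(...)
  if out = [] then [""] else out  -- ... or [""]

-- ===== PRECONDITION & SPEC =====
def Spec_blockConverter (sentence : String) (out : List String) : Prop := out = blockConverter_alt sentence
instance (sentence : String) (out : List String) : Decidable (Spec_blockConverter sentence out) := by unfold Spec_blockConverter; infer_instance

-- ===== CLAIM (what is proved, stated in full; the proofs are below) =====
def Claim_equal_blockConverter : Prop := ∀ (sentence : String), Dom_blockConverter sentence → Spec_blockConverter sentence (blockConverter sentence)

-- ===== LEMMAS AND PROOFS =====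

-- A's loop body once the index i and the character sentence[i] are paired up
def pvStepE (st : List String × List Char) : Int × Char → List String × List Char
  | (i, c) =>
    if PySem.Int.mod i 4 = 0 ∧ i ≠ 0 then (st.1 ++ [String.ofList st.2], pvEnc8 c)
    else (st.1, st.2 ++ pvEnc8 c)

def pvFinish (st : List String × List Char) : List String := st.1 ++ [String.ofList st.2]

def pvBlockStr (b : List Char) : String := String.ofList (PySem.Chars.join [] (b.map pvEnc8))

theorem pvChunk4_nil : pvChunk4 [] = [] := by rw [pvChunk4.eq_def]

theorem pvChunk4_cons (c : Char) (rest : List Char) :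
    pvChunk4 (c :: rest) = (c :: rest.take 3) :: pvChunk4 (rest.drop 3) := by rw [pvChunk4.eq_def]

theorem pvJoin_nil_cons (p : List Char) (L : List (List Char)) :
    PySem.Chars.join [] (p :: L) = p ++ PySem.Chars.join [] L := by
  cases L with
  | nil => simp [PySem.Chars.join_singleton, PySem.Chars.join_nil]
  | cons q L' => simp [PySem.Chars.join_cons_cons]

theorem pvEnumerate_append {α : Type} (x y : List α) (s : Int) :
    PySem.List.enumerate (x ++ y) s = PySem.List.enumerate x s ++ PySem.List.enumerate y (s + x.length) := by
  induction x generalizing s with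
  | nil => simp [PySem.List.enumerate_nil]
  | cons a x ih => simp [PySem.List.enumerate_cons, ih, add_assoc]; ring_nf

-- the index loop of A is the fold of pvStepE over the enumerated characters
theorem pvBridge (suf : List Char) : ∀ (pre : List Char) (init : List String × List Char),
    (PySem.List.pyRange (pre.length : Int) ((pre.length : Int) + suf.length)).foldl (pvStepA (pre ++ suf)) init
    = (PySem.List.enumerate suf (pre.length : Int)).foldl pvStepE init := by
  induction suf with
  | nil => intro pre init; simp [PySem.List.pyRange_one_eq_nil, PySem.List.enumerate_nil]
  | cons c suf ih =>
    intro pre init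
    rw [PySem.List.pyRange_one_cons (by simp only [List.length_cons]; push_cast; omega),
        PySem.List.enumerate_cons]
    simp only [List.foldl_cons]
    have hget : PySem.List.pyGetD (pre ++ c :: suf) (pre.length : Int) ' ' = c := by
      rw [PySem.List.pyGetD_eq_getElem _ _ (Int.natCast_nonneg _)
        (by simp only [List.length_append, List.length_cons]; push_cast; omega)]
      simp only [Int.toNat_natCast]
      simp [List.getElem_append_right (Nat.le_refl pre.length)]
    have hstep : pvStepA (pre ++ c :: suf) init (pre.length : Int) = pvStepE init ((pre.length : Int), c) := by
      by_cases h : PySem.Int.mod (pre.length : Int) 4 = 0 ∧ (pre.length : Int) ≠ 0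
      · simp only [pvStepA, pvStepE, hget, if_pos h]
        simp [pvEnc8]
      · simp only [pvStepA, pvStepE, hget, if_neg h]
        simp [pvEnc8]
    rw [hstep]
    have H := ih (pre ++ [c]) (pvStepE init ((pre.length : Int), c))
    simp only [List.append_assoc, List.singleton_append, List.length_append, List.length_cons,
      List.length_nil] at H ⊢
    push_cast at H ⊢
    rw [show (pre.length : Int) + ((suf.length : Int) + 1) = (pre.length : Int) + 1 + suf.length by ring]
    exact H

-- mid-block: no index in a .. a + b.length - 1 is a multiple of 4, so the fold only appends
theorem pvInblock (b : List Char) : ∀ (a : Int) (st : List String × List Char),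
    1 ≤ a % 4 → a % 4 + b.length ≤ 4 →
    (PySem.List.enumerate b a).foldl pvStepE st = (st.1, st.2 ++ PySem.Chars.join [] (b.map pvEnc8)) := by
  induction b with
  | nil => intro a st _ _; simp [PySem.List.enumerate_nil, PySem.Chars.join_nil]
  | cons c b ih =>
    intro a st h1 h2
    simp only [List.length_cons] at h2
    push_cast at h2
    rw [PySem.List.enumerate_cons]
    simp only [List.foldl_cons]
    have hcond : ¬ (PySem.Int.mod a 4 = 0 ∧ a ≠ 0) := by
      rw [PySem.Int.mod_eq_emod_of_pos (by norm_num)]; omega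
    have hstep : pvStepE st (a, c) = (st.1, st.2 ++ pvEnc8 c) := by
      simp only [pvStepE]; rw [if_neg hcond]
    rw [hstep]
    cases b with
    | nil =>
      simp [PySem.List.enumerate_nil]
    | cons d b' =>
      rw [ih (a + 1) _
        (by simp only [List.length_cons] at h2; push_cast at h2; omega)
        (by simp only [List.length_cons] at h2 ⊢; push_cast at h2 ⊢; omega)]
      simp only [List.map_cons, pvJoin_nil_cons]
      rw [List.append_assoc]

-- main loop invariant: a is the index of the second character of the current block,
-- acc holds the bits already accumulated for that block
theorem pvTail (n : Nat) : ∀ (rest : List Char), rest.length ≤ n →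
    ∀ (a : Int) (encoded : List String) (acc : List Char), 1 ≤ a → a % 4 = 1 →
    pvFinish ((PySem.List.enumerate rest a).foldl pvStepE (encoded, acc))
    = encoded ++ [String.ofList (acc ++ PySem.Chars.join [] ((rest.take 3).map pvEnc8))]
        ++ (pvChunk4 (rest.drop 3)).map pvBlockStr := by
  induction n with
  | zero =>
    intro rest hlen a encoded acc _ _
    have : rest = [] := List.eq_nil_of_length_eq_zero (by omega)
    subst this
    simp [PySem.List.enumerate_nil, pvFinish, pvChunk4_nil, PySem.Chars.join_nil]
  | succ n ih =>
    intro rest hlen a encoded acc ha hmod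
    rw [show rest = rest.take 3 ++ rest.drop 3 from (List.take_append_drop 3 rest).symm,
        pvEnumerate_append, List.foldl_append,
        pvInblock (rest.take 3) a (encoded, acc) (by omega) (by simp; omega)]
    simp only [List.take_append_drop]
    cases hd : rest.drop 3 with
    | nil => simp [PySem.List.enumerate_nil, pvFinish, pvChunk4_nil]
    | cons c' rest' =>
      have hlen3 : 3 < rest.length := by
        by_contra h
        have : rest.drop 3 = [] := List.drop_eq_nil_of_le (by omega)
        rw [hd] at this; exact absurd this (by simp)
      have htk : (rest.take 3).length = 3 := by simp; omega
      rw [PySem.List.enumerate_cons]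
      simp only [List.foldl_cons, htk]
      have hcond : PySem.Int.mod (a + 3) 4 = 0 ∧ (a + 3) ≠ 0 := by
        rw [PySem.Int.mod_eq_emod_of_pos (by norm_num)]
        constructor <;> omega
      have hstep : pvStepE (encoded, acc ++ PySem.Chars.join [] ((rest.take 3).map pvEnc8)) (a + 3, c')
          = (encoded ++ [String.ofList (acc ++ PySem.Chars.join [] ((rest.take 3).map pvEnc8))], pvEnc8 c') := by
        simp only [pvStepE]; rw [if_pos hcond]
      rw [show (a + (3 : Nat)) = a + 3 by push_cast; ring, hstep]
      have hr' : rest'.length ≤ n := by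
        have := congrArg List.length hd
        simp at this; omega
      rw [show (a + 3 + 1) = (a + 4) by ring]
      rw [ih rest' hr' (a + 4) _ (pvEnc8 c') (by omega) (by omega)]
      rw [pvChunk4_cons]
      simp [pvBlockStr, pvJoin_nil_cons, List.map_take]

-- ===== VERDICT (by name: the statement is the Claim_ definition above) =====
theorem blockConverter_spec : Claim_equal_blockConverter := by
  intro sentence _
  unfold Spec_blockConverter
  simp only [blockConverter, blockConverter_alt]
  have hbr := pvBridge sentence.toList [] ([], [])
  simp only [List.length_nil, Nat.cast_zero, List.nil_append, zero_add] at hbr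
  rw [hbr]
  cases hcs : sentence.toList with
  | nil => simp [PySem.List.enumerate_nil, pvChunk4_nil]
  | cons c rest =>
    rw [PySem.List.enumerate_cons]
    simp only [List.foldl_cons]
    have hcond : ¬ (PySem.Int.mod (0 : Int) 4 = 0 ∧ (0 : Int) ≠ 0) := by simp
    have hstep : pvStepE ([], []) (0, c) = ([], pvEnc8 c) := by
      simp only [pvStepE]; rw [if_neg hcond]; simp
    rw [hstep]
    have H := pvTail rest.length rest (Nat.le_refl _) 1 [] (pvEnc8 c) (by omega) (by decide)
    unfold pvFinish at H
    rw [show ((0 : Int) + 1) = 1 by ring, H]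
    rw [pvChunk4_cons]
    simp [pvBlockStr, pvJoin_nil_cons, List.map_take]
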